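-- pv_equiv track=rewrite | github.com/hyeoniiee/codingTest_all | 백준/Bronze/31458. ！！초콜릿 중독 주의！！/！！초콜릿 중독 주의！！.py | compute
-- ===== SOURCE A (Python) =====
-- def compute(expression):
--     expression = expression.strip()
--     count = 0  # 느낌표 개수
--
--     # 정수 앞쪽 느낌표 개수 세기
--     for ch in expression:
--         if ch == '!':
--             count += 1
--         else:
--             break  # 숫자가 나오면 중단
--
--     n = int(expression[count])  # 정수 (0 또는 1)
--
--     # 정수 뒤쪽 느낌표 개수 세기
--     b = len(expression) - count - 1  # 총 길이에서 앞쪽 느낌표와 숫자 제외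
--
--     if n == 0:  # 정수가 0일 때
--         if b != 0:  # 느낌표가 존재하면
--             return 1 if count % 2 == 0 else 0
--         else:
--             return 0 if count % 2 == 0 else 1
--     else:  # 정수가 1일 때
--         return 1 if count % 2 == 0 else 0
-- ===== SOURCE B (Python) =====
-- def compute(expression):
--     def ev(s):
--         if s[0] == '!':
--             return 1 - ev(s[1:])
--         n = int(s[0])
--         return 0 if n == 0 and len(s) == 1 else 1
--     return ev(expression.strip())
-- ===== Notes on version B (the rewrite author's own statement) =====
-- stated objective: alternative
-- what changed: Replaces A's counting loop plus parity arithmetic over the leading-'!' count and three-way nested if/else by a recursive evaluator that peels one leading '!' at a time as a logical negation (1 - ev(rest)), with a base case reading the digit and whether anything follows it.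
-- outside the precondition, e.g. on compute('!!'): A raises IndexError, B raises IndexError; on compute('!a'): A raises ValueError, B raises ValueError
import Mathlib
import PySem

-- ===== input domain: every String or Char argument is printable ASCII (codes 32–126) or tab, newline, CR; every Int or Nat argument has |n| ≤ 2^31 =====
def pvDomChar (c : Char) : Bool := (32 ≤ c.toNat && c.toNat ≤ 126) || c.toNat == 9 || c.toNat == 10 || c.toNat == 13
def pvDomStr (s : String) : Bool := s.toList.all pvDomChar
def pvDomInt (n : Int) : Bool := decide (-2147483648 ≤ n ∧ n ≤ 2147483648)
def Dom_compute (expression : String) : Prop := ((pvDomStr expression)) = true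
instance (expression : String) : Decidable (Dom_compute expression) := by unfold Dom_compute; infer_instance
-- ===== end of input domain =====

-- B replaces A's leading-'!' counting loop and parity arithmetic by a recursive evaluator that
-- peels one leading '!' at a time as a logical negation (objective: alternative).

-- ===== PORT A =====
-- the 'for ch in expression: if ch == '!': count += 1 else: break' loop
def computeCountLoop : List Char → Nat
  | [] => 0
  | c :: rest => if c = '!' then computeCountLoop rest + 1 else 0

def compute (expression : String) : Int :=
  let cs := PySem.Chars.strip expression.toList
  let count := computeCountLoop cs
  match PySem.List.pyGet? cs (count : Int) with
  | none => 0  -- IndexError in Python; outside Pre_compute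
  | some ch =>
    match PySem.Int.ofChars? [ch] with
    | none => 0  -- ValueError in Python; outside Pre_compute
    | some n =>
      let b : Int := (cs.length : Int) - (count : Int) - 1
      if n = 0 then
        if b ≠ 0 then (if count % 2 = 0 then 1 else 0)
        else (if count % 2 = 0 then 0 else 1)
      else (if count % 2 = 0 then 1 else 0)

-- ===== PORT B =====
-- the inner recursive 'ev': s[0] == '!' → 1 - ev(s[1:]); else base case on int(s[0]) and len(s)
def computeAltEv : List Char → Int
  | [] => 0  -- s[0] raises IndexError in Python; outside Pre_compute
  | c :: rest =>
    if c = '!' then 1 - computeAltEv rest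
    else
      match PySem.Int.ofChars? [c] with
      | none => 0  -- ValueError in Python; outside Pre_compute
      | some n => if n = 0 ∧ rest = [] then 0 else 1

def compute_alt (expression : String) : Int :=
  computeAltEv (PySem.Chars.strip expression.toList)

-- ===== PRECONDITION & SPEC =====
-- Pre_ excludes exactly the inputs on which Python A raises: the stripped string consists only of
-- '!' (IndexError, including the empty string) or the first non-'!' character is not parsable by
-- int() (ValueError).
def Pre_compute (expression : String) : Prop :=
  let cs := PySem.Chars.strip expression.toList
  let k := (cs.takeWhile (fun c => c == '!')).length
  k < cs.length ∧ (PySem.Int.ofChars? [cs.getD k ' ']).isSome = true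
instance (expression : String) : Decidable (Pre_compute expression) := by unfold Pre_compute; infer_instance

def pvWitness_compute : String := "!!0!!"

def Spec_compute (expression : String) (out : Int) : Prop := out = compute_alt expression
instance (expression : String) (out : Int) : Decidable (Spec_compute expression out) := by unfold Spec_compute; infer_instance

-- ===== CLAIM (what is proved, stated in full; the proofs are below) =====
def Claim_equal_compute : Prop := ∀ (expression : String), Dom_compute expression → Pre_compute expression → Spec_compute expression (compute expression)

-- ===== LEMMAS AND PROOFS =====

-- A's counting loop computes the length of the leading run of '!'
theorem computeCountLoop_eq_takeWhile (cs : List Char) :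
    computeCountLoop cs = (cs.takeWhile (fun c => c == '!')).length := by
  induction cs with
  | nil => rfl
  | cons c rest ih =>
    by_cases h : c = '!' <;> simp [computeCountLoop, h, ih]

-- closed form of B's recursive evaluator on strings where A returns: with k leading '!' and the
-- digit parsing to n, the value is determined by n, the parity of k, and whether anything follows
theorem computeAltEv_closed (cs : List Char) (n : Int)
    (hk : (cs.takeWhile (fun c => c == '!')).length < cs.length)
    (hn : PySem.Int.ofChars? [cs.getD (cs.takeWhile (fun c => c == '!')).length ' '] = some n) :
    computeAltEv cs =
      if n = 0 ∧ (cs.takeWhile (fun c => c == '!')).length + 1 = cs.length then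
        (if (cs.takeWhile (fun c => c == '!')).length % 2 = 0 then (0 : Int) else 1)
      else
        (if (cs.takeWhile (fun c => c == '!')).length % 2 = 0 then (1 : Int) else 0) := by
  induction cs with
  | nil => simp at hk
  | cons c rest ih =>
    by_cases h : c = '!'
    · simp only [h, List.takeWhile_cons, beq_self_eq_true, if_true, List.length_cons] at *
      have hk' : (rest.takeWhile (fun c => c == '!')).length < rest.length := by
        simpa using hk
      have hn' : PySem.Int.ofChars? [rest.getD (rest.takeWhile (fun c => c == '!')).length ' '] = some n := by
        simpa using hn
      rw [show computeAltEv ('!' :: rest) = 1 - computeAltEv rest from rfl, ih hk' hn']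
      by_cases h0 : n = 0 ∧ (rest.takeWhile (fun c => c == '!')).length + 1 = rest.length <;>
        by_cases hp : (rest.takeWhile (fun c => c == '!')).length % 2 = 0 <;>
        simp [h0, hp] <;> omega
    · have htw : (c :: rest).takeWhile (fun c => c == '!') = [] := by
        simp [h]
      rw [htw] at hn ⊢
      simp only [List.length_nil, List.getD_cons_zero] at hn ⊢
      simp only [computeAltEv, h, if_false, hn, List.length_cons]
      by_cases h0 : n = 0 <;> by_cases h1 : rest = [] <;>
        simp [h0, h1, List.length_eq_zero_iff]

-- ===== VERDICT (by name: the statement is the Claim_ definition above) =====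
theorem compute_spec : Claim_equal_compute := by
  intro expression _ hpre
  unfold Spec_compute compute compute_alt
  obtain ⟨hk, hsome⟩ := hpre
  set cs := PySem.Chars.strip expression.toList with hcs
  set k := (cs.takeWhile (fun c => c == '!')).length with hkdef
  simp only [computeCountLoop_eq_takeWhile, ← hkdef]
  have hget : PySem.List.pyGet? cs (k : Int) = some cs[k] := by
    rw [PySem.List.pyGet?_natCast]
    exact List.getElem?_eq_getElem hk
  rw [hget]
  dsimp only
  have hgd : cs.getD k ' ' = cs[k] := List.getD_eq_getElem cs ' ' hk
  obtain ⟨n, hn⟩ := Option.isSome_iff_exists.mp hsome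
  rw [hgd] at hn
  rw [hn, computeAltEv_closed cs n hk (by rw [hgd]; exact hn), ← hkdef]
  by_cases hn0 : n = 0 <;> by_cases hpar : k % 2 = 0 <;>
    by_cases hend : k + 1 = cs.length <;>
    simp [hn0, hpar, hend] <;> omega
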